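-- pv_equiv track=rewrite | github.com/bryonymoody/PolyChron | automated_mcmc_ordering_coupling.py | phase_limits
-- ===== SOURCE A (Python) =====
-- def phase_limits(phases, POST_PHASE):
--     "provides phase limits for a phase"""
--     upper = []
--     lower = []
--     i_phase = 0
--     for a_val in enumerate(POST_PHASE):
--         upper.append(phases[i_phase])
--         i_phase = i_phase + 1
--         lower.append(phases[i_phase])
--         if a_val[1] != "abuting":
--             i_phase = i_phase + 1
--     phase_bounds = [list(x) for x in zip(lower, upper)]
--     return phase_bounds
-- ===== SOURCE B (Python) =====
-- def phase_limits(phases, POST_PHASE):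
--     """provides phase limits for a phase"""
--     # unary keep/skip mask: every marker keeps one adjacent pair; a non-abuting one also skips one
--     mask = []
--     for v in POST_PHASE:
--         mask.append(True)
--         if v != "abuting":
--             mask.append(False)
--     # all adjacent (higher, lower) candidate pairs of phases, filtered by the mask
--     return [[hi, lo] for (hi, lo), keep in zip(zip(phases[1:], phases), mask) if keep]
-- ===== Notes on version B (the rewrite author's own statement) =====
-- stated objective: alternative
-- what changed: Replaces A's stateful-cursor walk (two parallel lists zipped at the end) by a mask-and-filter pipeline: a unary keep/skip mask derived from the markers selects pairs out of the wholesale list of all adjacent (higher, lower) pairs zip(phases[1:], phases); no index or cursor arithmetic remains.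
import Mathlib
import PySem

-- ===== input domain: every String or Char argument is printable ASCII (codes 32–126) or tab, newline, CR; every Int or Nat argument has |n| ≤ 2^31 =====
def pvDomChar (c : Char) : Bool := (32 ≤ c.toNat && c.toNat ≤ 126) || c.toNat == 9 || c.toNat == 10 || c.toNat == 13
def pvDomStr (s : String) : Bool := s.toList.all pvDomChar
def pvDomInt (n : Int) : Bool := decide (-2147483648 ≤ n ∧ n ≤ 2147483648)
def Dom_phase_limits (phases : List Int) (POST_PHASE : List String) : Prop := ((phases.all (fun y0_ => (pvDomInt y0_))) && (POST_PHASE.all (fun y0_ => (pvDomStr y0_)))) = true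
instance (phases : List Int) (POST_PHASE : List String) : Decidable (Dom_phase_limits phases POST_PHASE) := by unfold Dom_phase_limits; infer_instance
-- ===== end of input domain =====

-- B replaces A's stateful-cursor walk by a mask-and-filter pipeline: a unary keep/skip mask
-- from the markers filters the wholesale list of adjacent pairs ("alternative", same cost).

-- ===== PORT A =====
-- A's loop over enumerate(POST_PHASE) with state (upper, lower, i_phase).
-- phases[i] is PySem.List.pyGet?; Pre_ guarantees it is in range (.getD 0 is never reached there).
def phase_limits (phases : List Int) (POST_PHASE : List String) : List (List Int) :=
  let st := POST_PHASE.foldl (fun (acc : List Int × List Int × Int) a_val =>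
    let upper := acc.1 ++ [(PySem.List.pyGet? phases acc.2.2).getD 0]
    let i1 := acc.2.2 + 1
    let lower := acc.2.1 ++ [(PySem.List.pyGet? phases i1).getD 0]
    let i2 := if a_val ≠ "abuting" then i1 + 1 else i1
    (upper, lower, i2)) ([], [], 0)
  (st.2.1.zip st.1).map (fun x => [x.1, x.2])

-- ===== PORT B =====
-- B's first loop builds the keep/skip mask; then zip of all adjacent pairs with the mask, filter, map.
def phase_limits_alt (phases : List Int) (POST_PHASE : List String) : List (List Int) :=
  let mask := POST_PHASE.foldl (fun (m : List Bool) v =>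
    let m := m ++ [true]
    if v ≠ "abuting" then m ++ [false] else m) []
  let adj := (PySem.List.slice phases (some 1) none).zip phases
  ((adj.zip mask).filter (fun x => x.2)).map (fun x => [x.1.1, x.1.2])

-- ===== PRECONDITION & SPEC =====
-- Pre_ excludes exactly the inputs where Python A raises IndexError (phases too short for the
-- pairs POST_PHASE demands: the largest cursor reached is the step sum of all but the last marker, plus 1).
def Pre_phase_limits (phases : List Int) (POST_PHASE : List String) : Prop :=
  POST_PHASE = [] ∨
    (POST_PHASE.dropLast.foldl (fun a v => a + if v = "abuting" then 1 else 2) 0) + 2 ≤ (phases.length : Int)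
instance (phases : List Int) (POST_PHASE : List String) : Decidable (Pre_phase_limits phases POST_PHASE) := by unfold Pre_phase_limits; infer_instance
def pvWitness_phase_limits : List Int × List String := ([1, 2, 3], ["abuting", "x"])

def Spec_phase_limits (phases : List Int) (POST_PHASE : List String) (out : List (List Int)) : Prop := out = phase_limits_alt phases POST_PHASE
instance (phases : List Int) (POST_PHASE : List String) (out : List (List Int)) : Decidable (Spec_phase_limits phases POST_PHASE out) := by unfold Spec_phase_limits; infer_instance

-- ===== CLAIM (what is proved, stated in full; the proofs are below) =====
def Claim_equal_phase_limits : Prop := ∀ (phases : List Int) (POST_PHASE : List String), Dom_phase_limits phases POST_PHASE → Pre_phase_limits phases POST_PHASE → Spec_phase_limits phases POST_PHASE (phase_limits phases POST_PHASE)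
-- ===== LEMMAS AND PROOFS =====

-- canonical list of (lower, upper) pairs starting at cursor i (A-side characterisation)
def pvPairs (phases : List Int) : List String -> Int -> List (Int × Int)
  | [], _ => []
  | v :: r, i =>
      ((PySem.List.pyGet? phases (i + 1)).getD 0, (PySem.List.pyGet? phases i).getD 0) ::
        pvPairs phases r (i + if v = "abuting" then 1 else 2)

-- suffix-based characterisation (B-side)
def pvP : List Int -> List String -> List (Int × Int)
  | _, [] => []
  | xs, v :: r =>
      ((PySem.List.pyGet? xs 1).getD 0, (PySem.List.pyGet? xs 0).getD 0) ::
        pvP (xs.drop (if v = "abuting" then 1 else 2)) r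

def pvSum (r : List String) : Int := r.foldl (fun a v => a + if v = "abuting" then 1 else 2) 0

lemma sum_shift (r : List String) (a b : Int) :
    r.foldl (fun a v => a + if v = "abuting" then 1 else 2) (a + b)
    = a + r.foldl (fun a v => a + if v = "abuting" then 1 else 2) b := by
  induction r generalizing b with
  | nil => simp
  | cons w r ih => simp only [List.foldl_cons]; rw [add_assoc, ih]

lemma foldl_from (r : List String) (a : Int) :
    r.foldl (fun a v => a + if v = "abuting" then 1 else 2) a = a + pvSum r := by
  have h := sum_shift r a 0
  simpa [pvSum] using h

lemma pvSum_cons (v : String) (l : List String) :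
    pvSum (v :: l) = (if v = "abuting" then 1 else 2) + pvSum l := by
  simp only [pvSum, List.foldl_cons, zero_add]
  exact foldl_from l _

lemma pvSum_nonneg (r : List String) : 0 ≤ pvSum r := by
  induction r with
  | nil => simp [pvSum]
  | cons v r ih => rw [pvSum_cons]; by_cases h : v = "abuting" <;> simp [h] <;> omega

lemma foldA_eq (phases : List Int) (r : List String) (u l : List Int) (i : Int) :
    r.foldl (fun (acc : List Int × List Int × Int) a_val =>
      let upper := acc.1 ++ [(PySem.List.pyGet? phases acc.2.2).getD 0]
      let i1 := acc.2.2 + 1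
      let lower := acc.2.1 ++ [(PySem.List.pyGet? phases i1).getD 0]
      let i2 := if a_val ≠ "abuting" then i1 + 1 else i1
      (upper, lower, i2)) (u, l, i)
    = (u ++ (pvPairs phases r i).map (·.2), l ++ (pvPairs phases r i).map (·.1),
       i + (r.foldl (fun a v => a + if v = "abuting" then 1 else 2) 0)) := by
  induction r generalizing u l i with
  | nil => simp [pvPairs]
  | cons v r ih =>
      simp only [List.foldl_cons, pvPairs, List.map_cons]
      rw [ih]
      have hstep : (if v ≠ "abuting" then i + 1 + 1 else i + 1)
          = i + (if v = "abuting" then 1 else 2) := by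
        by_cases h : v = "abuting" <;> simp [h] <;> try ring
      simp only [hstep]
      refine Prod.ext (by simp) (Prod.ext (by simp) ?_)
      simp only
      conv_rhs => rw [zero_add, ← add_zero (if v = "abuting" then (1:Int) else 2)]
      rw [sum_shift r _ 0, ← add_assoc]

-- bridge: the cursor characterisation at a natural cursor is the suffix characterisation
lemma pvPairs_eq_pvP (phases : List Int) (r : List String) (k : Nat) :
    pvPairs phases r (k : Int) = pvP (phases.drop k) r := by
  induction r generalizing k with
  | nil => simp [pvPairs, pvP]
  | cons v r ih =>
      simp only [pvPairs, pvP]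
      have h1 : PySem.List.pyGet? (phases.drop k) 1 = phases[k+1]? := by
        rw [PySem.List.pyGet?_of_nonneg _ (by norm_num : (0:Int) ≤ 1)]
        norm_num [List.getElem?_drop]
      have h0 : PySem.List.pyGet? (phases.drop k) 0 = phases[k]? := by
        rw [PySem.List.pyGet?_zero]
        simp [List.getElem?_drop]
      have hk : PySem.List.pyGet? phases (k : Int) = phases[k]? := PySem.List.pyGet?_natCast _ _
      have hk1 : PySem.List.pyGet? phases ((k : Int) + 1) = phases[k+1]? := by
        rw [show ((k:Int) + 1) = ((k + 1 : Nat) : Int) by push_cast; ring,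
          PySem.List.pyGet?_natCast]
      rw [h0, h1, hk, hk1]
      congr 1
      by_cases h : v = "abuting"
      · rw [if_pos h, if_pos h,
          show ((k:Int) + 1) = ((k + 1 : Nat) : Int) by push_cast; ring, ih (k+1),
          List.drop_drop]
      · rw [if_neg h, if_neg h,
          show ((k:Int) + 2) = ((k + 2 : Nat) : Int) by push_cast; ring, ih (k+2),
          List.drop_drop]

-- B's mask fold as a recursion
def pvMask : List String -> List Bool
  | [] => []
  | v :: r => (if v = "abuting" then [true] else [true, false]) ++ pvMask r

lemma foldB_mask (r : List String) (m : List Bool) :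
    r.foldl (fun (m : List Bool) v =>
      let m := m ++ [true]
      if v ≠ "abuting" then m ++ [false] else m) m = m ++ pvMask r := by
  induction r generalizing m with
  | nil => simp [pvMask]
  | cons v r ih =>
      simp only [List.foldl_cons]
      rw [ih]
      by_cases h : v = "abuting" <;> simp [pvMask, h]

-- the mask-filter pipeline on a suffix equals the suffix characterisation, given enough elements
lemma mask_filter_eq (r : List String) (xs : List Int)
    (hpre : r = [] ∨ pvSum r.dropLast + 2 ≤ (xs.length : Int)) :
    ((((xs.drop 1).zip xs).zip (pvMask r)).filter (fun x => x.2)).map (fun x => [x.1.1, x.1.2])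
    = (pvP xs r).map (fun x => [x.1, x.2]) := by
  induction r generalizing xs with
  | nil => simp [pvMask, pvP]
  | cons v r ih =>
      have hc : pvSum ((v :: r).dropLast) + 2 ≤ (xs.length : Int) :=
        hpre.resolve_left (by simp)
      have hv1 : (1:Int) ≤ if v = "abuting" then 1 else 2 := by
        by_cases h : v = "abuting" <;> simp [h]
      have hlen : 2 ≤ xs.length := by
        rcases r with _ | ⟨w, r'⟩
        · simp [pvSum] at hc; omega
        · rw [List.dropLast_cons_of_ne_nil (by simp), pvSum_cons] at hc
          have hs := pvSum_nonneg (w :: r').dropLast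
          omega
      obtain ⟨a, xs', rfl⟩ : ∃ a xs', xs = a :: xs' := by
        rcases xs with _ | ⟨a, xs'⟩
        · simp at hlen
        · exact ⟨a, xs', rfl⟩
      obtain ⟨b, t, rfl⟩ : ∃ b t, xs' = b :: t := by
        rcases xs' with _ | ⟨b, t⟩
        · simp at hlen
        · exact ⟨b, t, rfl⟩
      have hget0 : (PySem.List.pyGet? (a :: b :: t) 0).getD 0 = a := by
        rw [PySem.List.pyGet?_zero]; rfl
      have hget1 : (PySem.List.pyGet? (a :: b :: t) 1).getD 0 = b := by
        rw [PySem.List.pyGet?_of_nonneg _ (by norm_num : (0:Int) ≤ 1)]; rfl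
      by_cases h : v = "abuting"
      · have hih : r = [] ∨ pvSum r.dropLast + 2 ≤ ((b :: t).length : Int) := by
          rcases r with _ | ⟨w, r'⟩
          · exact Or.inl rfl
          · right
            rw [List.dropLast_cons_of_ne_nil (by simp), pvSum_cons, if_pos h] at hc
            simp only [List.length_cons] at hc ⊢
            push_cast at hc ⊢
            omega
        have hd := ih (b :: t) hih
        simp only [List.drop_succ_cons, List.drop_zero] at hd
        simp only [pvP, pvMask, List.map_cons]
        rw [hget0, hget1]
        simp [h, hd]
      · rcases t with _ | ⟨c, t'⟩
        · -- only two elements remain: r must be empty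
          have hr : r = [] := by
            rcases r with _ | ⟨w, r'⟩
            · rfl
            · exfalso
              rw [List.dropLast_cons_of_ne_nil (by simp), pvSum_cons, if_neg h] at hc
              have hs := pvSum_nonneg (w :: r').dropLast
              simp only [List.length_cons, List.length_nil] at hc
              push_cast at hc
              omega
          subst hr
          simp only [pvP, pvMask, List.map_cons]
          rw [hget0, hget1]
          simp [h]
        · have hih : r = [] ∨ pvSum r.dropLast + 2 ≤ ((c :: t').length : Int) := by
            rcases r with _ | ⟨w, r'⟩
            · exact Or.inl rfl
            · right
              rw [List.dropLast_cons_of_ne_nil (by simp), pvSum_cons, if_neg h] at hc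
              simp only [List.length_cons] at hc ⊢
              push_cast at hc ⊢
              omega
          have hd := ih (c :: t') hih
          simp only [List.drop_succ_cons, List.drop_zero] at hd
          simp only [pvP, pvMask, List.map_cons]
          rw [hget0, hget1]
          simp [h, hd]

-- ===== VERDICT (by name: the statements are the Claim_ definitions above) =====
theorem phase_limits_spec : Claim_equal_phase_limits := by
  intro phases POST_PHASE _ hpre
  show phase_limits phases POST_PHASE = phase_limits_alt phases POST_PHASE
  unfold phase_limits phase_limits_alt
  simp only [foldA_eq, foldB_mask, List.nil_append]
  rw [List.zip_map']
  rw [PySem.List.slice_from_one, ← List.drop_one]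
  have h0 : pvPairs phases POST_PHASE 0 = pvP phases POST_PHASE := by
    simpa using pvPairs_eq_pvP phases POST_PHASE 0
  rw [h0, mask_filter_eq POST_PHASE phases hpre]
  simp
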